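-- pv_equiv track=rewrite | github.com/Treeki/CylindricalEarth | msbt.py | hash_bucket_count
-- ===== SOURCE A (Python) =====
-- def hash_bucket_count(string_count):
-- 	primes = (
-- 		2,3,5,7,11,13,17,19,23,29,31,37,41,43,
-- 		47,53,59,61,67,71,73,79,83,89,97,101
-- 		)
-- 	target = (string_count // 2) + 1
-- 	for prime in primes:
-- 		if prime >= target:
-- 			return prime
-- 	return primes[-1]
-- ===== SOURCE B (Python) =====
-- def hash_bucket_count(string_count):
--     primes = (
--         2,3,5,7,11,13,17,19,23,29,31,37,41,43,
--         47,53,59,61,67,71,73,79,83,89,97,101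
--         )
--     target = (string_count // 2) + 1
--     lo, hi = 0, len(primes)
--     while lo < hi:
--         mid = (lo + hi) // 2
--         if primes[mid] < target:
--             lo = mid + 1
--         else:
--             hi = mid
--     return primes[-1] if lo == len(primes) else primes[lo]
-- ===== Notes on version B (the rewrite author's own statement) =====
-- stated objective: alternative
-- what changed: Replaced the linear scan over the primes tuple with a hand-written binary search (bisect_left) that finds the first prime >= target, falling back to the last prime when the search runs off the end.
import Mathlib
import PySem

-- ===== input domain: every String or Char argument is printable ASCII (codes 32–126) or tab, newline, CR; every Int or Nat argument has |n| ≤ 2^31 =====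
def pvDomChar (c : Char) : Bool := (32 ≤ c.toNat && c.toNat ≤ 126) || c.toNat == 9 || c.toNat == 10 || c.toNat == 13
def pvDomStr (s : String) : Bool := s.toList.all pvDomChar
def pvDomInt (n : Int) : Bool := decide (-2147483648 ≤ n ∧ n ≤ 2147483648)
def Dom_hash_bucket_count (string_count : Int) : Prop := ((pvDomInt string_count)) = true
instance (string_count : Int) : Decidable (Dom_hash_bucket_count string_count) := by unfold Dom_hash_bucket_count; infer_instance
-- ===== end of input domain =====

-- B replaces A's linear scan of the primes table by a binary search (bisect_left); alternative, not faster on a 26-entry table.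

-- the primes tuple both Pythons hard-code
def pvPrimes : List Int :=
  [2,3,5,7,11,13,17,19,23,29,31,37,41,43,47,53,59,61,67,71,73,79,83,89,97,101]

-- ===== PORT A =====
-- the 'for prime in primes: if prime >= target: return prime' loop (early return = some)
def pvScan (xs : List Int) (target : Int) : Option Int :=
  match xs with
  | [] => none
  | p :: ps => if p ≥ target then some p else pvScan ps target

def hash_bucket_count (string_count : Int) : Int :=
  match pvScan pvPrimes (PySem.Int.floordiv string_count 2 + 1) with
  | some p => p
  | none => (PySem.List.pyGet? pvPrimes (-1)).getD 0  -- primes[-1]; always in range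

-- ===== PORT B =====
-- hand-written bisect_left loop from Source B; fuel = xs.length bounds the while loop (it never runs out)
def pvBisectLeft (xs : List Int) (x : Int) : Nat → Nat → Nat → Nat
  | 0, lo, _ => lo
  | fuel + 1, lo, hi =>
    if lo < hi then
      let mid := (lo + hi) / 2
      if xs.getD mid 0 < x then pvBisectLeft xs x fuel (mid + 1) hi
      else pvBisectLeft xs x fuel lo mid
    else lo

def hash_bucket_count_alt (string_count : Int) : Int :=
  let target := PySem.Int.floordiv string_count 2 + 1
  let lo := pvBisectLeft pvPrimes target pvPrimes.length 0 pvPrimes.length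
  if lo = pvPrimes.length then (PySem.List.pyGet? pvPrimes (-1)).getD 0
  else (PySem.List.pyGet? pvPrimes (Int.ofNat lo)).getD 0

-- ===== PRECONDITION & SPEC =====
def Spec_hash_bucket_count (string_count : Int) (out : Int) : Prop := out = hash_bucket_count_alt string_count
instance (string_count : Int) (out : Int) : Decidable (Spec_hash_bucket_count string_count out) := by unfold Spec_hash_bucket_count; infer_instance

-- ===== CLAIM (what is proved, stated in full; the proofs are below) =====
def Claim_equal_hash_bucket_count : Prop := ∀ (string_count : Int), Dom_hash_bucket_count string_count → Spec_hash_bucket_count string_count (hash_bucket_count string_count)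

-- ===== LEMMAS AND PROOFS =====

-- core fact: for every target t the two searches give the same prime
theorem pv_key (t : Int) :
    (match pvScan pvPrimes t with
     | some p => p
     | none => (PySem.List.pyGet? pvPrimes (-1)).getD 0) =
    (let lo := pvBisectLeft pvPrimes t pvPrimes.length 0 pvPrimes.length
     if lo = pvPrimes.length then (PySem.List.pyGet? pvPrimes (-1)).getD 0
     else (PySem.List.pyGet? pvPrimes (Int.ofNat lo)).getD 0) := by
  rcases le_or_gt t 2 with h | h
  · simp [pvPrimes, pvScan, pvBisectLeft,
      show (2:Int) ≥ t by omega, show ¬((43:Int) < t) by omega,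
      show ¬((17:Int) < t) by omega, show ¬((7:Int) < t) by omega,
      show ¬((3:Int) < t) by omega, show ¬((2:Int) < t) by omega,
      PySem.List.pyGet?, PySem.List.pyIdx?]
  · rcases le_or_gt t 101 with h' | h'
    · interval_cases t <;> decide
    · simp [pvPrimes, pvScan, pvBisectLeft,
        show ∀ c : Int, c ≤ 101 → ¬(c ≥ t) from fun c hc => by omega,
        show ∀ c : Int, c ≤ 101 → c < t from fun c hc => by omega]

-- ===== VERDICT (by name: the statement is the Claim_ definition above) =====
theorem hash_bucket_count_spec : Claim_equal_hash_bucket_count := by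
  intro n _
  unfold Spec_hash_bucket_count hash_bucket_count hash_bucket_count_alt
  exact pv_key (PySem.Int.floordiv n 2 + 1)
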